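-- pv_equiv track=rewrite | github.com/pilloverx/NETBEAR | fuzzer.py | generate_xss_test_urls
-- ===== SOURCE A (Python) =====
-- XSS_PAYLOADS = [
--     "<script>alert('XSS')</script>",
--     "<img src=x onerror=alert('XSS')>",
--     "<svg onload=alert('XSS')>",
--     "javascript:alert('XSS')",
--     "<iframe src=javascript:alert('XSS')>",
--     "<body onload=alert('XSS')>",
--     "<input onfocus=alert('XSS') autofocus>",
--     "<marquee onstart=alert('XSS')>",
--     "'><script>alert('XSS')</script>",
--     '"><script>alert("XSS")</script>'
-- ]
--
-- def generate_xss_test_urls(base_url: str, param_name: str, payloads=None):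
--     """
--     Generate XSS test URLs for a given parameter.
--     """
--     if payloads is None:
--         payloads = XSS_PAYLOADS[:5]  # Use first 5 for light fuzzing
--
--     test_urls = []
--     for payload in payloads:
--         # URL encode the payload
--         encoded = payload.replace("'", "%27").replace('"', "%22").replace("<", "%3C").replace(">", "%3E").replace(" ", "%20")
--         if "?" in base_url:
--             test_url = f"{base_url}&{param_name}={encoded}"
--         else:
--             test_url = f"{base_url}?{param_name}={encoded}"
--         test_urls.append(test_url)
--
--     return test_urls
-- ===== SOURCE B (Python) =====
-- XSS_PAYLOADS = [
--     "<script>alert('XSS')</script>",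
--     "<img src=x onerror=alert('XSS')>",
--     "<svg onload=alert('XSS')>",
--     "javascript:alert('XSS')",
--     "<iframe src=javascript:alert('XSS')>",
--     "<body onload=alert('XSS')>",
--     "<input onfocus=alert('XSS') autofocus>",
--     "<marquee onstart=alert('XSS')>",
--     "'><script>alert('XSS')</script>",
--     '"><script>alert("XSS")</script>'
-- ]
--
-- _ENC = {"'": "%27", '"': "%22", "<": "%3C", ">": "%3E", " ": "%20"}
--
-- def generate_xss_test_urls(base_url: str, param_name: str, payloads=None):
--     """Generate XSS test URLs for a given parameter (single table-driven encoding pass)."""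
--     if payloads is None:
--         payloads = XSS_PAYLOADS[:5]
--     prefix = f"{base_url}{'&' if '?' in base_url else '?'}{param_name}="
--     return [prefix + "".join(_ENC.get(c, c) for c in payload) for payload in payloads]
-- ===== Notes on version B (the rewrite author's own statement) =====
-- stated objective: idiomatic
-- what changed: Replaces A's five sequential .replace() scans per payload with a single table-driven per-character encoding pass (dict lookup + join), hoists the '?'-branch and URL prefix out of the loop, and builds the result with a list comprehension.
import Mathlib
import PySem

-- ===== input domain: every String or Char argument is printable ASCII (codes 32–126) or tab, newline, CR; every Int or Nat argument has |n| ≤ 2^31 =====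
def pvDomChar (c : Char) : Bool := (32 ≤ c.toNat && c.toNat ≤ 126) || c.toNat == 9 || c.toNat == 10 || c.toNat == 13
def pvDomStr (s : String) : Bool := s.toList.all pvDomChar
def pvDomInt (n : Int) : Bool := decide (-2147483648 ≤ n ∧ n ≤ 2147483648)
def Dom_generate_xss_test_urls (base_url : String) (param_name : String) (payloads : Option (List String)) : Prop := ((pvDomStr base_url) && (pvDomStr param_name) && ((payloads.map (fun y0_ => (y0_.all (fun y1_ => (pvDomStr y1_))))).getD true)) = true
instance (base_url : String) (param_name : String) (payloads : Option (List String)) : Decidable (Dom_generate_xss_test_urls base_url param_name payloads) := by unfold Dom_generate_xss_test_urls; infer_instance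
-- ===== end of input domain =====

-- ===== PORT A =====
-- B replaces A's five chained .replace passes by one table-driven per-character pass
-- and hoists the '?'-branch out of the loop (objective: idiomatic; return value proved equal).
def pvXSS_PAYLOADS : List String := [
  "<script>alert('XSS')</script>",
  "<img src=x onerror=alert('XSS')>",
  "<svg onload=alert('XSS')>",
  "javascript:alert('XSS')",
  "<iframe src=javascript:alert('XSS')>",
  "<body onload=alert('XSS')>",
  "<input onfocus=alert('XSS') autofocus>",
  "<marquee onstart=alert('XSS')>",
  "'><script>alert('XSS')</script>",
  "\"><script>alert(\"XSS\")</script>"]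

-- f-string concatenation is ported as String ++ (exact: plain concatenation of the pieces)
def generate_xss_test_urls (base_url : String) (param_name : String) (payloads : Option (List String)) : List String :=
  let ps := payloads.getD (PySem.List.slice pvXSS_PAYLOADS none (some 5))
  ps.foldl (fun test_urls payload =>
    let encoded := PySem.Str.replace (PySem.Str.replace (PySem.Str.replace (PySem.Str.replace
      (PySem.Str.replace payload "'" "%27") "\"" "%22") "<" "%3C") ">" "%3E") " " "%20"
    let test_url := if PySem.Str.isIn "?" base_url then
        base_url ++ "&" ++ param_name ++ "=" ++ encoded
      else
        base_url ++ "?" ++ param_name ++ "=" ++ encoded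
    test_urls ++ [test_url]) []

-- ===== PORT B =====
def pvENC : PySem.Dict Char String :=
  PySem.Dict.ofList [('\'', "%27"), ('"', "%22"), ('<', "%3C"), ('>', "%3E"), (' ', "%20")]

def generate_xss_test_urls_alt (base_url : String) (param_name : String) (payloads : Option (List String)) : List String :=
  let ps := payloads.getD (PySem.List.slice pvXSS_PAYLOADS none (some 5))
  let pref := base_url ++ (if PySem.Str.isIn "?" base_url then "&" else "?") ++ param_name ++ "="
  ps.map (fun payload =>
    pref ++ PySem.Str.join "" (payload.toList.map (fun c => pvENC.getD c (String.ofList [c]))))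

-- ===== PRECONDITION & SPEC =====
def Spec_generate_xss_test_urls (base_url : String) (param_name : String) (payloads : Option (List String)) (out : List String) : Prop := out = generate_xss_test_urls_alt base_url param_name payloads
instance (base_url : String) (param_name : String) (payloads : Option (List String)) (out : List String) : Decidable (Spec_generate_xss_test_urls base_url param_name payloads out) := by unfold Spec_generate_xss_test_urls; infer_instance

-- ===== CLAIM (what is proved, stated in full; the proofs are below) =====
def Claim_equal_generate_xss_test_urls : Prop := ∀ (base_url : String) (param_name : String) (payloads : Option (List String)), Dom_generate_xss_test_urls base_url param_name payloads → Spec_generate_xss_test_urls base_url param_name payloads (generate_xss_test_urls base_url param_name payloads)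

-- ===== LEMMAS AND PROOFS =====

-- the per-character encoding that both programs implement
def pvEncFun (x : Char) : List Char :=
  if x = '\'' then ['%','2','7'] else if x = '"' then ['%','2','2']
  else if x = '<' then ['%','3','C'] else if x = '>' then ['%','3','E']
  else if x = ' ' then ['%','2','0'] else [x]

theorem pvGoSingle (c : Char) (new : List Char) :
    ∀ (l : List Char) (fuel : Nat) (acc : List Char), l.length ≤ fuel →
    PySem.Chars.replace.go [c] new fuel l acc
      = acc.reverse ++ l.flatMap (fun x => if x = c then new else [x]) := by
  intro l
  induction l with
  | nil =>
    intro fuel acc h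
    cases fuel <;> simp [PySem.Chars.replace.go]
  | cons x t ih =>
    intro fuel acc h
    cases fuel with
    | zero => simp at h
    | succ n =>
      rw [PySem.Chars.replace.go]
      by_cases hx : x = c
      · subst hx
        simp [List.isPrefixOf, ih n (new.reverse ++ acc) (by simpa using h)]
      · simp [List.isPrefixOf, BEq.symm_false, hx,
          ih n (x :: acc) (by simpa using h), Ne.symm hx]

theorem pvReplaceSingle (cs : List Char) (c : Char) (new : List Char) :
    PySem.Chars.replace cs [c] new = cs.flatMap (fun x => if x = c then new else [x]) := by
  have := pvGoSingle c new cs cs.length [] le_rfl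
  simpa [PySem.Chars.replace] using this

-- the five single-character replacements compose to one pvEncFun pass
theorem pvChainHead (x : Char) :
    (((((if x = '\'' then "%27".toList else [x]).flatMap
      (fun y => if y = '"' then "%22".toList else [y])).flatMap
      (fun y => if y = '<' then "%3C".toList else [y])).flatMap
      (fun y => if y = '>' then "%3E".toList else [y])).flatMap
      (fun y => if y = ' ' then "%20".toList else [y])) = pvEncFun x := by
  by_cases h1 : x = '\''; · subst h1; decide
  by_cases h2 : x = '"'; · subst h2; decide
  by_cases h3 : x = '<'; · subst h3; decide
  by_cases h4 : x = '>'; · subst h4; decide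
  by_cases h5 : x = ' '; · subst h5; decide
  simp [pvEncFun, h1, h2, h3, h4, h5]

theorem pvChain (cs : List Char) :
    (((((cs.flatMap (fun y => if y = '\'' then "%27".toList else [y])).flatMap
      (fun y => if y = '"' then "%22".toList else [y])).flatMap
      (fun y => if y = '<' then "%3C".toList else [y])).flatMap
      (fun y => if y = '>' then "%3E".toList else [y])).flatMap
      (fun y => if y = ' ' then "%20".toList else [y])) = cs.flatMap pvEncFun := by
  induction cs with
  | nil => rfl
  | cons x t ih =>
    simp only [List.flatMap_cons, List.flatMap_append, ih]
    rw [pvChainHead x]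

-- A's chained replaces, on the character level
theorem pvEncA (p : String) :
    (PySem.Str.replace (PySem.Str.replace (PySem.Str.replace (PySem.Str.replace
      (PySem.Str.replace p "'" "%27") "\"" "%22") "<" "%3C") ">" "%3E") " " "%20").toList
    = p.toList.flatMap pvEncFun := by
  simp only [PySem.Str.toList_replace]
  rw [show ("'" : String).toList = ['\''] from rfl,
     show ("\"" : String).toList = ['"'] from rfl,
     show ("<" : String).toList = ['<'] from rfl,
     show (">" : String).toList = ['>'] from rfl,
     show (" " : String).toList = [' '] from rfl]
  rw [pvReplaceSingle, pvReplaceSingle, pvReplaceSingle, pvReplaceSingle, pvReplaceSingle]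
  exact pvChain p.toList

theorem pvJoinNil (l : List (List Char)) : PySem.Chars.join [] l = l.flatten := by
  show List.intercalate [] l = l.flatten
  induction l with
  | nil => rfl
  | cons x xs ih =>
    cases xs with
    | nil => simp [List.intercalate]
    | cons y ys =>
      simp only [List.intercalate, List.intersperse] at *
      simp_all

-- the table lookup computes pvEncFun
theorem pvGetD (c : Char) : (pvENC.getD c (String.ofList [c])).toList = pvEncFun c := by
  have hENC : pvENC = PySem.Dict.mk
      [('\'', "%27"), ('"', "%22"), ('<', "%3C"), ('>', "%3E"), (' ', "%20")] := by decide
  by_cases h1 : c = '\''; · subst h1; decide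
  by_cases h2 : c = '"'; · subst h2; decide
  by_cases h3 : c = '<'; · subst h3; decide
  by_cases h4 : c = '>'; · subst h4; decide
  by_cases h5 : c = ' '; · subst h5; decide
  rw [hENC]
  simp [PySem.Dict.getD, PySem.Dict.get?, pvEncFun, h1, h2, h3, h4, h5,
    Ne.symm h1, Ne.symm h2, Ne.symm h3, Ne.symm h4, Ne.symm h5]

-- B's encoding, on the character level
theorem pvEncB (p : String) :
    (PySem.Str.join "" (p.toList.map (fun c => pvENC.getD c (String.ofList [c])))).toList
    = p.toList.flatMap pvEncFun := by
  rw [PySem.Str.toList_join]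
  simp only [List.map_map]
  rw [show ("" : String).toList = [] from rfl, pvJoinNil]
  rw [show ((fun s => String.toList s) ∘ fun c => pvENC.getD c (String.ofList [c]))
      = pvEncFun from funext fun c => pvGetD c]
  rw [List.flatMap_def]

-- ===== VERDICT (by name: the statement is the Claim_ definition above) =====
theorem generate_xss_test_urls_spec : Claim_equal_generate_xss_test_urls := by
  intro base_url param_name payloads _
  unfold Spec_generate_xss_test_urls generate_xss_test_urls generate_xss_test_urls_alt
  rw [PySem.List.foldl_append_singleton_eq_map]
  refine List.map_congr_left fun p _ => ?_
  by_cases hq : PySem.Str.isIn "?" base_url = true <;>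
    simp only [hq, if_true, if_false, Bool.false_eq_true] <;>
    · apply String.toList_inj.mp
      simp only [String.toList_append, pvEncA, pvEncB]
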